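-- pv_equiv track=rewrite | github.com/Jeremie-Silva/challenge_python | challenge_string_3.py | replace_characters_in_text
-- ===== SOURCE A (Python) =====
-- def replace_characters_in_text(text: str, begin: int, end: int, new_character: str) -> str:
--     new_text = ""
--     count = 1
--     for letter in text:
--         if letter == " ":
--             new_text += " "
--         elif begin <= count <= end:
--             new_text += new_character
--             count += 1
--         else:
--             new_text += letter
--             count += 1
--     return new_text
-- ===== SOURCE B (Python) =====
-- def replace_characters_in_text(text: str, begin: int, end: int, new_character: str) -> str:
--     result = list(text)
--     positions = [i for i, ch in enumerate(text) if ch != " "]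
--     for j in range(max(0, begin - 1), min(len(positions), end)):
--         result[positions[j]] = new_character
--     return "".join(result)
-- ===== Notes on version B (the rewrite author's own statement) =====
-- stated objective: alternative
-- what changed: A scans the string once while threading a non-space counter and growing an output string; B first builds the index list of non-space positions, then overwrites the clamped rank range [max(0,begin-1), min(len(positions),end)) in a mutable character list and joins it.
import Mathlib
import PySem

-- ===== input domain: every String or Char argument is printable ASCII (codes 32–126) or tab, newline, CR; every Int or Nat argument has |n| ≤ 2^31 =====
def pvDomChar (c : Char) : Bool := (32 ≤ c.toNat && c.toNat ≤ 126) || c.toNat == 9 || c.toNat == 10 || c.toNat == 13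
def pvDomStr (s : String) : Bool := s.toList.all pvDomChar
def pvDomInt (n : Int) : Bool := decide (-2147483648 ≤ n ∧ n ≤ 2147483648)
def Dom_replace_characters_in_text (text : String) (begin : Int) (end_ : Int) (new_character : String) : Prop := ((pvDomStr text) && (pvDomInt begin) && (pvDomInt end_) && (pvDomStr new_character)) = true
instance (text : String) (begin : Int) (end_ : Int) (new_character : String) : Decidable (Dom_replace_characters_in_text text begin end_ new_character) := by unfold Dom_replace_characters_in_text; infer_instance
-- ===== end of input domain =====

-- B replaces A's count-while-scanning with an index-first pass: it precomputes the list of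
-- non-space positions and overwrites the clamped rank range in a mutable list (alternative decomposition, not faster).

-- ===== PORT A =====
-- the 'for letter in text' loop of A, threading (new_text, count)
def pvALoop (b e : Int) (nc : List Char) : List Char → List Char → Int → List Char
  | [], acc, _ => acc
  | c :: rest, acc, count =>
    if c = ' ' then pvALoop b e nc rest (acc ++ [' ']) count
    else if b ≤ count ∧ count ≤ e then pvALoop b e nc rest (acc ++ nc) (count + 1)
    else pvALoop b e nc rest (acc ++ [c]) (count + 1)

def replace_characters_in_text (text : String) (begin : Int) (end_ : Int) (new_character : String) : String :=
  String.ofList (pvALoop begin end_ new_character.toList text.toList [] 1)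

-- ===== PORT B =====
def replace_characters_in_text_alt (text : String) (begin : Int) (end_ : Int) (new_character : String) : String :=
  let chars := text.toList
  let result := chars.map (fun c => [c])
  let positions := ((PySem.List.enumerate chars 0).filter
      (fun p => decide (p.2 ≠ ' '))).map Prod.fst
  let lo := max 0 (begin - 1)
  let hi := min ((positions.length : Int)) end_
  let final := (PySem.List.pyRange lo hi 1).foldl
      (fun res j => PySem.List.pySetD res (PySem.List.pyGetD positions j 0) new_character.toList)
      result
  String.ofList final.flatten

-- ===== PRECONDITION & SPEC =====
def Spec_replace_characters_in_text (text : String) (begin : Int) (end_ : Int) (new_character : String) (out : String) : Prop := out = replace_characters_in_text_alt text begin end_ new_character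
instance (text : String) (begin : Int) (end_ : Int) (new_character : String) (out : String) : Decidable (Spec_replace_characters_in_text text begin end_ new_character out) := by unfold Spec_replace_characters_in_text; infer_instance

-- ===== CLAIM (what is proved, stated in full; the proofs are below) =====
def Claim_equal_replace_characters_in_text : Prop := ∀ (text : String) (begin : Int) (end_ : Int) (new_character : String), Dom_replace_characters_in_text text begin end_ new_character → Spec_replace_characters_in_text text begin end_ new_character (replace_characters_in_text text begin end_ new_character)

-- ===== LEMMAS AND PROOFS =====
def pvOut (b e : Int) (nc : List Char) (c : Char) (k : Int) : List Char :=
  if c = ' ' then [' '] else if b ≤ k ∧ k ≤ e then nc else [c]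
def pvSpec (b e : Int) (nc : List Char) : List Char → Int → List (List Char)
  | [], _ => []
  | c :: rest, count =>
    pvOut b e nc c count :: pvSpec b e nc rest (if c = ' ' then count else count + 1)
def pvRnk (l : List Char) (i : Nat) : Nat := ((l.take i).filter (fun c => decide (c ≠ ' '))).length
def pvPos : List Char → Int → List Int
  | [], _ => []
  | c :: rest, s => if c = ' ' then pvPos rest (s + 1) else s :: pvPos rest (s + 1)

theorem pvRnk_zero (l : List Char) : pvRnk l 0 = 0 := by simp [pvRnk]

theorem pvRnk_succ (c : Char) (rest : List Char) (i : Nat) :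
    pvRnk (c :: rest) (i + 1) = (if c = ' ' then 0 else 1) + pvRnk rest i := by
  by_cases hc : c = ' ' <;> simp [pvRnk, hc, Nat.add_comm]

theorem pvSpec_getElem? (b e : Int) (nc : List Char) :
    ∀ (l : List Char) (count : Int) (i : Nat) (h : i < l.length),
      (pvSpec b e nc l count)[i]? = some (pvOut b e nc l[i] (count + (pvRnk l i : Int))) := by
  intro l
  induction l with
  | nil => intro _ i h; simp at h
  | cons c rest ih =>
    intro count i h
    cases i with
    | zero => simp [pvSpec, pvRnk_zero]
    | succ i =>
      have hi : i < rest.length := by simpa using h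
      by_cases hc : c = ' '
      · simp [pvSpec, hc, ih _ _ hi, pvRnk_succ]
      · simp [pvSpec, hc, ih _ _ hi, pvRnk_succ, add_assoc]

theorem pvPos_eq_enumerate :
    ∀ (l : List Char) (s : Int),
      ((PySem.List.enumerate l s).filter (fun p => decide (p.2 ≠ ' '))).map Prod.fst = pvPos l s := by
  intro l
  induction l with
  | nil => intro s; simp [PySem.List.enumerate_nil, pvPos]
  | cons c rest ih =>
    intro s
    by_cases hc : c = ' '
    · simp [PySem.List.enumerate_cons, pvPos, hc]
      simpa using ih (s+1)
    · simp [PySem.List.enumerate_cons, pvPos, hc]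
      simpa using ih (s+1)

theorem pvPos_length : ∀ (l : List Char) (s : Int), (pvPos l s).length = pvRnk l l.length := by
  intro l
  induction l with
  | nil => intro s; simp [pvPos, pvRnk]
  | cons c rest ih =>
    intro s
    by_cases hc : c = ' '
    · simp [pvPos, hc, ih (s+1), pvRnk_succ]
    · simp [pvPos, hc, ih (s+1), pvRnk_succ, Nat.add_comm]

theorem pvPos_getElem? :
    ∀ (l : List Char) (s : Int) (j : Nat), j < (pvPos l s).length →
      ∃ (i : Nat) (h : i < l.length),
        (pvPos l s)[j]? = some (s + i) ∧ l[i] ≠ ' ' ∧ pvRnk l i = j := by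
  intro l
  induction l with
  | nil => intro s j hj; simp [pvPos] at hj
  | cons c rest ih =>
    intro s j hj
    by_cases hc : c = ' '
    · simp [pvPos, hc] at hj
      obtain ⟨i, hi, h1, h2, h3⟩ := ih (s+1) j (by simpa [pvPos, hc] using hj)
      exact ⟨i+1, by simpa using hi, by simp [pvPos, hc, h1]; ring, by simpa using h2,
        by simp [pvRnk_succ, hc, h3]⟩
    · cases j with
      | zero =>
        exact ⟨0, by simp, by simp [pvPos, hc], by simpa using hc, by simp [pvRnk]⟩
      | succ j =>
        have hj' : j < (pvPos rest (s+1)).length := by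
          simpa [pvPos, hc] using hj
        obtain ⟨i, hi, h1, h2, h3⟩ := ih (s+1) j hj'
        exact ⟨i+1, by simpa using hi, by simp [pvPos, hc, h1]; ring, by simpa using h2,
          by simp [pvRnk_succ, hc, h3, Nat.add_comm]⟩

theorem pvPos_getElem?_rnk :
    ∀ (l : List Char) (s : Int) (i : Nat) (h : i < l.length), l[i] ≠ ' ' →
      (pvPos l s)[(pvRnk l i)]? = some (s + i) := by
  intro l
  induction l with
  | nil => intro _ i h; simp at h
  | cons c rest ih =>
    intro s i h hi
    cases i with
    | zero =>
      simp at hi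
      simp [pvPos, hi, pvRnk]
    | succ i =>
      have h' : i < rest.length := by simpa using h
      have := ih (s+1) i h' (by simpa using hi)
      by_cases hc : c = ' '
      · simp [pvPos, hc, pvRnk_succ, this]; ring
      · simp [pvPos, hc, pvRnk_succ, Nat.add_comm 1 (pvRnk rest i), this]; ring

theorem pvRnk_lt (l : List Char) (i : Nat) (h : i < l.length) (hc : l[i] ≠ ' ') :
    pvRnk l i < pvRnk l l.length := by
  have h1 : l.take (i+1) = l.take i ++ [l[i]] := by
    rw [List.take_add_one, List.getElem?_eq_getElem h]
    rfl
  have h2 : pvRnk l (i+1) = pvRnk l i + 1 := by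
    simp only [pvRnk, h1, List.filter_append, List.length_append]
    simp [hc]
  have h3 : pvRnk l (i+1) ≤ pvRnk l l.length := by
    simp only [pvRnk, List.take_length]
    exact List.Sublist.length_le (List.Sublist.filter _ (List.take_sublist _ _))
  omega

theorem foldl_pySetD_getElem? {β : Type} (v : β) (f : Int → Int) :
    ∀ (js : List Int) (L : List β) (i : Nat), (∀ j ∈ js, 0 ≤ f j) →
      (js.foldl (fun res j => PySem.List.pySetD res (f j) v) L)[i]? =
        if (∃ j ∈ js, f j = (i : Int)) ∧ i < L.length then some v else L[i]? := by
  intro js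
  induction js with
  | nil => intro L i _; simp
  | cons j js ih =>
    intro L i hall
    have hj : 0 ≤ f j := hall j (by simp)
    have hset : PySem.List.pySetD L (f j) v = L.set (f j).toNat v :=
      PySem.List.pySetD_of_nonneg _ _ hj
    simp only [List.foldl_cons, hset]
    rw [ih _ i (fun j' hj' => hall j' (by simp [hj']))]
    by_cases hcur : f j = (i : Int)
    · have hti : (f j).toNat = i := by omega
      by_cases hlen : i < L.length
      · simp [List.length_set, hlen, hcur]
      · simp [List.length_set, hlen]
    · have hti : (f j).toNat ≠ i := by omega
      simp [List.length_set, hti, hcur]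

theorem pvPos_val (chars : List Char) (j : Nat) (hj : j < (pvPos chars 0).length) :
    ∃ i : Nat, i < chars.length ∧ (pvPos chars 0)[j]? = some (i : Int) ∧
      chars[i]? = some chars[i]! ∧ chars[i]! ≠ ' ' ∧ pvRnk chars i = j := by
  obtain ⟨i, hi, h1, h2, h3⟩ := pvPos_getElem? chars 0 j hj
  refine ⟨i, hi, by simpa using h1, ?_, ?_, h3⟩
  · simp [List.getElem!_eq_getElem?_getD, List.getElem?_eq_getElem hi]
  · simpa [List.getElem!_eq_getElem?_getD, List.getElem?_eq_getElem hi] using h2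


theorem pvSpec_length (b e : Int) (v : List Char) :
    ∀ (l : List Char) (count : Int), (pvSpec b e v l count).length = l.length := by
  intro l
  induction l with
  | nil => intro count; simp [pvSpec]
  | cons c rest ih => intro count; simp [pvSpec, ih]

theorem pvHit_iff (b e : Int) (chars : List Char) (i : Nat) (hilen : i < chars.length)
    (hsp : chars[i] ≠ ' ') :
    ((∃ j ∈ PySem.List.pyRange (max 0 (b-1)) (min (((pvPos chars 0).length : Int)) e) 1,
        PySem.List.pyGetD (pvPos chars 0) j 0 = (i : Int))
      ↔ (b ≤ 1 + (pvRnk chars i : Int) ∧ 1 + (pvRnk chars i : Int) ≤ e)) := by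
  have hrlt : pvRnk chars i < (pvPos chars 0).length := by
    rw [pvPos_length chars 0]; exact pvRnk_lt chars i hilen hsp
  constructor
  · rintro ⟨j, hj, hfj⟩
    rw [PySem.List.mem_pyRange_one] at hj
    have hj0 : 0 ≤ j := le_trans (le_max_left 0 (b-1)) hj.1
    have hjlen : j < ((pvPos chars 0).length : Int) := lt_of_lt_of_le hj.2 (min_le_left _ _)
    have hjl : j.toNat < (pvPos chars 0).length := by omega
    obtain ⟨i', hi', h1, -, hne', hr'⟩ := pvPos_val chars j.toNat hjl
    rw [PySem.List.pyGetD_eq_getElem (pvPos chars 0) 0 hj0 hjlen] at hfj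
    have h2 : (pvPos chars 0)[j.toNat] = (i' : Int) := by
      have := List.getElem?_eq_getElem hjl
      rw [h1] at this; exact (Option.some.inj this).symm
    have hii : i' = i := by omega
    subst hii
    rw [hr'] at *
    constructor
    · have := le_trans (le_max_right 0 (b-1)) hj.1; omega
    · have := lt_of_lt_of_le hj.2 (min_le_right _ _); omega
  · rintro ⟨hb, he⟩
    refine ⟨(pvRnk chars i : Int), ?_, ?_⟩
    · rw [PySem.List.mem_pyRange_one]
      constructor
      · simp; omega
      · simp; constructor
        · exact_mod_cast hrlt
        · omega
    · rw [PySem.List.pyGetD_eq_getElem (pvPos chars 0) 0 (by positivity) (by exact_mod_cast hrlt)]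
      have h1 := pvPos_getElem?_rnk chars 0 i hilen hsp
      have h2 : (pvPos chars 0)[(((pvRnk chars i : Int)).toNat)]? = some ((0:Int) + i) := by
        simpa using h1
      have h3 := List.getElem?_eq_getElem
        (show ((pvRnk chars i : Int)).toNat < (pvPos chars 0).length by simpa using hrlt)
      rw [h2] at h3
      have h4 := Option.some.inj h3
      omega

theorem final_eq_pvSpec (b e : Int) (v chars : List Char) :
    ((PySem.List.pyRange (max 0 (b-1)) (min (((pvPos chars 0).length : Int)) e) 1).foldl
      (fun res j => PySem.List.pySetD res (PySem.List.pyGetD (pvPos chars 0) j 0) v)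
      (chars.map (fun c => [c])))
    = pvSpec b e v chars 1 := by
  have hnn : ∀ j ∈ PySem.List.pyRange (max 0 (b-1)) (min (((pvPos chars 0).length : Int)) e) 1,
      0 ≤ PySem.List.pyGetD (pvPos chars 0) j 0 := by
    intro j hj
    rw [PySem.List.mem_pyRange_one] at hj
    have hj0 : 0 ≤ j := le_trans (le_max_left 0 (b-1)) hj.1
    have hjlen : j < ((pvPos chars 0).length : Int) := lt_of_lt_of_le hj.2 (min_le_left _ _)
    have hjl : j.toNat < (pvPos chars 0).length := by omega
    obtain ⟨i, hi', h1, -, -, -⟩ := pvPos_val chars j.toNat hjl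
    rw [PySem.List.pyGetD_eq_getElem (pvPos chars 0) 0 hj0 hjlen]
    have h2 : (pvPos chars 0)[j.toNat] = (i : Int) := by
      have := List.getElem?_eq_getElem hjl
      rw [h1] at this; exact (Option.some.inj this).symm
    rw [h2]; positivity
  apply List.ext_getElem?
  intro i
  rw [foldl_pySetD_getElem? v _ _ _ i hnn]
  by_cases hilen : i < chars.length
  · rw [pvSpec_getElem? b e v chars 1 i hilen]
    have hLi : (chars.map (fun c => [c]))[i]? = some [chars[i]] := by
      simp [List.getElem?_eq_getElem hilen]
    by_cases hsp : chars[i] = ' '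
    · have hnoj : ¬ ∃ j ∈ PySem.List.pyRange (max 0 (b-1)) (min (((pvPos chars 0).length : Int)) e) 1,
          PySem.List.pyGetD (pvPos chars 0) j 0 = (i : Int) := by
        rintro ⟨j, hj, hfj⟩
        rw [PySem.List.mem_pyRange_one] at hj
        have hj0 : 0 ≤ j := le_trans (le_max_left 0 (b-1)) hj.1
        have hjlen : j < ((pvPos chars 0).length : Int) := lt_of_lt_of_le hj.2 (min_le_left _ _)
        have hjl : j.toNat < (pvPos chars 0).length := by omega
        obtain ⟨i', hi', h1, hg', hne', -⟩ := pvPos_val chars j.toNat hjl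
        rw [PySem.List.pyGetD_eq_getElem (pvPos chars 0) 0 hj0 hjlen] at hfj
        have h2 : (pvPos chars 0)[j.toNat] = (i' : Int) := by
          have := List.getElem?_eq_getElem hjl
          rw [h1] at this; exact (Option.some.inj this).symm
        have hii : i' = i := by omega
        subst hii
        apply hne'
        have : chars[i']! = chars[i'] := by
          simp [List.getElem!_eq_getElem?_getD, List.getElem?_eq_getElem hi']
        rw [this, hsp]
      simp only [hnoj, false_and, if_false, hLi]
      simp [pvOut, hsp]
    · by_cases hcond : b ≤ 1 + (pvRnk chars i : Int) ∧ 1 + (pvRnk chars i : Int) ≤ e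
      · have hex := (pvHit_iff b e chars i hilen hsp).mpr hcond
        simp only [hex, true_and, List.length_map, hilen, if_true]
        simp [pvOut, hsp, hcond]
      · have hnoj := (pvHit_iff b e chars i hilen hsp).not.mpr hcond
        simp only [hnoj, false_and, if_false, hLi]
        simp [pvOut, hsp, hcond]
  · have h1 : (chars.map (fun c : Char => [c]))[i]? = none := by
      simp; omega
    have h2 : (pvSpec b e v chars 1)[i]? = none := by
      rw [List.getElem?_eq_none]
      rw [pvSpec_length]; omega
    simp only [h1, h2, List.length_map]
    simp [hilen]

theorem pvALoop_eq (b e : Int) (nc : List Char) :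
    ∀ (l acc : List Char) (count : Int),
      pvALoop b e nc l acc count = acc ++ (pvSpec b e nc l count).flatten := by
  intro l
  induction l with
  | nil => intro acc count; simp [pvALoop, pvSpec]
  | cons c rest ih =>
    intro acc count
    by_cases hc : c = ' '
    · simp [pvALoop, pvSpec, pvOut, hc, ih]
    · by_cases hbe : b ≤ count ∧ count ≤ e
      · simp [pvALoop, pvSpec, pvOut, hc, hbe, ih]
      · simp [pvALoop, pvSpec, pvOut, hc, hbe, ih]

theorem final_thm (text : String) (b e : Int) (nc : String) :
    replace_characters_in_text text b e nc = replace_characters_in_text_alt text b e nc := by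
  unfold replace_characters_in_text replace_characters_in_text_alt
  rw [pvALoop_eq]
  simp only [List.nil_append, pvPos_eq_enumerate, final_eq_pvSpec]

-- ===== VERDICT (by name: the statement is the Claim_ definition above) =====
theorem replace_characters_in_text_spec : Claim_equal_replace_characters_in_text := by
  intro text b e nc _
  unfold Spec_replace_characters_in_text
  exact final_thm text b e nc
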